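-- pv_equiv track=rewrite | github.com/BabalauCristian10C/14septembrie | tda.py | divizor
-- ===== SOURCE A (Python) =====
-- def divizor(x,y):
--     a,b = [],[]
--     for i in range(1,x+1):
--         if (x%i == 0):
--             a.append(i)
--     for i in range(1,y+1):
--         if (y%i == 0):
--             b.append(i)
--     d = [a,b]
--     return d;
-- ===== SOURCE B (Python) =====
-- def divizor(x, y):
--     def divs(n):
--         small, large = [], []
--         i = 1
--         while i * i <= n:
--             if n % i == 0:
--                 small.append(i)
--                 q = n // i
--                 if q != i:
--                     large.append(q)
--             i += 1
--         large.reverse()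
--         return small + large
--     return [divs(x), divs(y)]
-- ===== Notes on version B (the rewrite author's own statement) =====
-- stated objective: faster
-- what changed: replaces the two full 1..n scans by trial division up to sqrt(n), collecting each divisor pair (i, n//i) and reversing the large half to keep ascending order
import Mathlib
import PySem

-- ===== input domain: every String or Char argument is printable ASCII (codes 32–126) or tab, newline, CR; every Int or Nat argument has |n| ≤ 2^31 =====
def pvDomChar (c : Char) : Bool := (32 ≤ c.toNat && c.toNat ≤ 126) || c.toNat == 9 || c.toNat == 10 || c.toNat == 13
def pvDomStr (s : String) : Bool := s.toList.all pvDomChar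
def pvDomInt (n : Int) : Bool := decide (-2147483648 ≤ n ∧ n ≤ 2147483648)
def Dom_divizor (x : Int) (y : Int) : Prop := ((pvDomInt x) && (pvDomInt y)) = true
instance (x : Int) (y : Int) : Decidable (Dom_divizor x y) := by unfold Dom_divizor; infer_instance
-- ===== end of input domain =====

-- B replaces A's two full 1..n scans by trial division up to √n collecting divisor pairs (asymptotically faster).

-- ===== PORT A =====
-- one 'for i in range(1, n+1): if n % i == 0: acc.append(i)' loop (A runs it once for x, once for y)
def divsA (n : Int) : List Int :=
  (PySem.List.pyRange 1 (n + 1) 1).foldl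
    (fun a i => if PySem.Int.mod n i == 0 then a ++ [i] else a) []

def divizor (x : Int) (y : Int) : List (List Int) :=
  [divsA x, divsA y]

-- ===== PORT B =====
-- the 'while i * i <= n' loop of Source B's divs: small collects i, large collects q = n // i
def divsBGo (n : Int) (i : Nat) (small large : List Int) : List Int :=
  if h : ((i : Int) * (i : Int)) ≤ n then
    if PySem.Int.mod n (i : Int) == 0 then
      let q := PySem.Int.floordiv n (i : Int)
      divsBGo n (i + 1) (small ++ [(i : Int)])
        (if q ≠ (i : Int) then large ++ [q] else large)
    else
      divsBGo n (i + 1) small large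
  else
    small ++ large.reverse
termination_by n.toNat + 1 - i
decreasing_by
  all_goals
    have hi : i ≤ n.toNat := by
      rcases Nat.eq_zero_or_pos i with h0 | h0
      · omega
      · have : (i : Int) ≤ (i : Int) * (i : Int) :=
          le_mul_of_one_le_left (by exact_mod_cast Nat.zero_le i) (by exact_mod_cast h0)
        omega
  all_goals omega

def divsB (n : Int) : List Int := divsBGo n 1 [] []

def divizor_alt (x : Int) (y : Int) : List (List Int) :=
  [divsB x, divsB y]

-- ===== PRECONDITION & SPEC =====
def Spec_divizor (x : Int) (y : Int) (out : List (List Int)) : Prop := out = divizor_alt x y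
instance (x : Int) (y : Int) (out : List (List Int)) : Decidable (Spec_divizor x y out) := by unfold Spec_divizor; infer_instance

-- ===== CLAIM (what is proved, stated in full; the proofs are below) =====
def Claim_equal_divizor : Prop := ∀ (x : Int) (y : Int), Dom_divizor x y → Spec_divizor x y (divizor x y)

-- ===== LEMMAS AND PROOFS =====

-- two strictly increasing lists with the same members are equal
theorem pv_eq_of_pairwise_lt {l₁ l₂ : List Int} (h₁ : l₁.Pairwise (· < ·)) (h₂ : l₂.Pairwise (· < ·))
    (h : ∀ a, a ∈ l₁ ↔ a ∈ l₂) : l₁ = l₂ :=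
  (List.perm_of_nodup_nodup_toFinset_eq h₁.nodup h₂.nodup
    (by ext a; simpa using h a)).eq_of_pairwise
    (fun a b _ _ hab hba => le_antisymm hab.le hba.le) h₁ h₂

-- the divisor test A and B both run
def pvP (n : Int) : Int → Bool := fun i => PySem.Int.mod n i == 0

-- the small half B collects up to s, and the matching large half, as filtered ranges
def pvSm (n : Int) (i : Nat) (s : Nat) : List Int :=
  (PySem.List.pyRange (i : Int) ((s : Int) + 1) 1).filter (pvP n)

def pvLg (n : Int) (i : Nat) (s : Nat) : List Int :=
  ((pvSm n i s).filter (fun d => decide (PySem.Int.floordiv n d ≠ d))).map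
    (fun d => PySem.Int.floordiv n d)

theorem pv_divsA_eq_filter (n : Int) :
    divsA n = (PySem.List.pyRange 1 (n + 1) 1).filter (pvP n) := by
  simpa [divsA, pvP] using
    PySem.List.foldl_append_if_eq_filter (pvP n) (PySem.List.pyRange 1 (n + 1) 1) []

-- loop invariant for divsBGo
theorem pv_go_spec (n : Int) (hn : 1 ≤ n) (s : Nat) (hs : s = Nat.sqrt n.toNat)
    (i : Nat) (hi : 1 ≤ i) (small large : List Int) :
    divsBGo n i small large = small ++ pvSm n i s ++ (large ++ pvLg n i s).reverse := by
  have hn0 : 0 ≤ n := by omega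
  have key : ∀ j : Nat, (((j : Int) * (j : Int)) ≤ n) ↔ j ≤ s := by
    intro j
    have hc : ((j * j : Nat) : Int) = (j : Int) * (j : Int) := by push_cast; ring
    rw [hs, Nat.le_sqrt, ← hc]
    omega
  obtain ⟨k, hk⟩ : ∃ k, s + 1 - i = k := ⟨_, rfl⟩
  induction k generalizing i small large with
  | zero =>
    have his : s < i := by omega
    rw [divsBGo]
    have hguard : ¬ (((i : Int) * (i : Int)) ≤ n) := by
      rw [key]; omega
    rw [dif_neg hguard]
    have hnil : PySem.List.pyRange (i : Int) ((s : Int) + 1) 1 = [] :=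
      PySem.List.pyRange_one_eq_nil (by exact_mod_cast his)
    simp [pvSm, pvLg, hnil]
  | succ k ih =>
    have his : i ≤ s := by omega
    have hguard : (((i : Int) * (i : Int)) ≤ n) := by rw [key]; omega
    rw [divsBGo, dif_pos hguard]
    have hcons : PySem.List.pyRange (i : Int) ((s : Int) + 1) 1
        = (i : Int) :: PySem.List.pyRange ((i : Int) + 1) ((s : Int) + 1) 1 :=
      PySem.List.pyRange_one_cons (by exact_mod_cast Nat.lt_succ_of_le his)
    have hSm : pvSm n i s
        = if pvP n (i : Int) then (i : Int) :: pvSm n (i + 1) s else pvSm n (i + 1) s := by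
      simp only [pvSm, hcons, List.filter_cons]
      push_cast
      split <;> rfl
    have hLg : pvLg n i s
        = if pvP n (i : Int) then
            (if PySem.Int.floordiv n (i : Int) ≠ (i : Int) then
              PySem.Int.floordiv n (i : Int) :: pvLg n (i + 1) s
            else pvLg n (i + 1) s)
          else pvLg n (i + 1) s := by
      simp only [pvLg, hSm]
      split
      · simp only [List.filter_cons]
        split <;> simp_all
      · rfl
    by_cases hp : pvP n (i : Int)
    · rw [show (PySem.Int.mod n (i : Int) == 0) = pvP n (i : Int) from rfl, hp, if_pos rfl]
      show divsBGo n (i + 1) (small ++ [(i : Int)])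
          (if PySem.Int.floordiv n (i : Int) ≠ (i : Int)
            then large ++ [PySem.Int.floordiv n (i : Int)] else large)
        = small ++ pvSm n i s ++ (large ++ pvLg n i s).reverse
      by_cases hq : PySem.Int.floordiv n (i : Int) ≠ (i : Int)
      · rw [if_pos hq, ih (i + 1) (by omega) _ _ (by omega)]
        rw [hSm, hLg, if_pos hp, if_pos hp, if_pos hq]
        simp
      · rw [if_neg hq, ih (i + 1) (by omega) _ _ (by omega)]
        rw [hSm, hLg, if_pos hp, if_pos hp, if_neg hq]
        simp
    · rw [show (PySem.Int.mod n (i : Int) == 0) = pvP n (i : Int) from rfl]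
      rw [Bool.of_not_eq_true hp, if_neg (by simp)]
      rw [ih (i + 1) (by omega) _ _ (by omega)]
      rw [hSm, hLg, if_neg hp, if_neg hp]

-- membership in B's small half
theorem pv_mem_Sm (n : Int) (s : Nat) (a : Int) :
    a ∈ pvSm n 1 s ↔ 1 ≤ a ∧ a ≤ (s : Int) ∧ a ∣ n := by
  simp only [pvSm, List.mem_filter, PySem.List.mem_pyRange_one, pvP, beq_iff_eq,
    PySem.Int.mod_eq_zero_iff_dvd]
  constructor
  · rintro ⟨⟨h1, h2⟩, h3⟩
    exact ⟨h1, by omega, h3⟩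
  · rintro ⟨h1, h2, h3⟩
    exact ⟨⟨h1, by omega⟩, h3⟩

theorem pv_mem_Lg (n : Int) (hn : 1 ≤ n) (s : Nat) (hs : s = Nat.sqrt n.toNat) (a : Int) :
    a ∈ pvLg n 1 s ↔ (s : Int) < a ∧ a ≤ n ∧ a ∣ n := by
  have hn0 : 0 ≤ n := by omega
  have hs1 : (s : Int) * (s : Int) ≤ n := by
    have := Nat.sqrt_le n.toNat
    rw [hs]; omega
  have hs2 : n < ((s : Int) + 1) * ((s : Int) + 1) := by
    have h := Nat.lt_succ_sqrt n.toNat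
    rw [Nat.succ_eq_add_one] at h
    have h2 : (n.toNat : Int) < ((Nat.sqrt n.toNat : Int) + 1) * ((Nat.sqrt n.toNat : Int) + 1) := by
      exact_mod_cast h
    rw [hs]; omega
  have hsp : 1 ≤ (s : Int) := by
    have : 1 ≤ Nat.sqrt n.toNat := by
      rw [Nat.le_sqrt]; omega
    rw [hs]; exact_mod_cast this
  simp only [pvLg, List.mem_map, List.mem_filter, decide_eq_true_eq]
  constructor
  · rintro ⟨d, ⟨hdSm, hne⟩, rfl⟩
    rw [pv_mem_Sm n s d] at hdSm
    obtain ⟨hd1, hds, hdvd⟩ := hdSm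
    rw [PySem.Int.floordiv_eq_ediv_of_pos (by omega)] at hne ⊢
    have hmul : n / d * d = n := Int.ediv_mul_cancel hdvd
    have ha1 : 1 ≤ n / d := by nlinarith
    refine ⟨?_, by nlinarith, ⟨d, by linarith⟩⟩
    by_contra hle
    push Not at hle
    have h1 : n / d = (s : Int) := by nlinarith
    have h2 : d = (s : Int) := by nlinarith
    exact hne (by rw [h1, h2])
  · rintro ⟨hsa, han, hdvd⟩
    have ha1 : 1 ≤ a := by omega
    have hmul : n / a * a = n := Int.ediv_mul_cancel hdvd
    have hd1 : 1 ≤ n / a := by nlinarith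
    have hdn : n / a ≤ (s : Int) := by
      by_contra hgt
      push Not at hgt
      nlinarith
    have hne0 : n / a ≠ 0 := by omega
    have hq : n / (n / a) = a := by
      have h : n / a * a / (n / a) = a := Int.mul_ediv_cancel_left a hne0
      rwa [hmul] at h
    refine ⟨n / a, ⟨?_, ?_⟩, ?_⟩
    · rw [pv_mem_Sm n s]
      exact ⟨hd1, hdn, ⟨a, by linarith⟩⟩
    · rw [PySem.Int.floordiv_eq_ediv_of_pos (by omega), hq]
      omega
    · rw [PySem.Int.floordiv_eq_ediv_of_pos (by omega), hq]

theorem pv_divs_eq (n : Int) : divsA n = divsB n := by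
  rcases le_or_gt n 0 with hn | hn
  · rw [pv_divsA_eq_filter, PySem.List.pyRange_one_eq_nil (by omega)]
    rw [divsB, divsBGo, dif_neg (by push_cast; omega)]
    simp
  · set s := Nat.sqrt n.toNat with hsdef
    have hn0 : 0 ≤ n := by omega
    have hs1 : (s : Int) * (s : Int) ≤ n := by
      have := Nat.sqrt_le n.toNat
      rw [hsdef]; omega
    have hsp : 1 ≤ (s : Int) := by
      have : 1 ≤ Nat.sqrt n.toNat := by rw [Nat.le_sqrt]; omega
      rw [hsdef]; exact_mod_cast this
    have hsn : (s : Int) ≤ n := by nlinarith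
    rw [divsB, pv_go_spec n (by omega) s hsdef 1 (by omega) [] []]
    simp only [List.nil_append]
    rw [pv_divsA_eq_filter]
    have hA : ∀ a : Int, a ∈ (PySem.List.pyRange 1 (n + 1) 1).filter (pvP n)
        ↔ 1 ≤ a ∧ a ≤ n ∧ a ∣ n := by
      intro a
      simp only [List.mem_filter, PySem.List.mem_pyRange_one, pvP, beq_iff_eq,
        PySem.Int.mod_eq_zero_iff_dvd]
      constructor
      · rintro ⟨⟨h1, h2⟩, h3⟩
        exact ⟨h1, by omega, h3⟩
      · rintro ⟨h1, h2, h3⟩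
        exact ⟨⟨h1, by omega⟩, h3⟩
    apply pv_eq_of_pairwise_lt
    · exact (PySem.List.pairwise_lt_pyRange_one 1 (n + 1)).filter _
    · rw [List.pairwise_append]
      refine ⟨(PySem.List.pairwise_lt_pyRange_one _ _).filter _, ?_, ?_⟩
      · rw [List.pairwise_reverse]
        unfold pvLg
        rw [List.pairwise_map]
        refine List.Pairwise.imp_of_mem ?_ (((PySem.List.pairwise_lt_pyRange_one _ _).filter _).filter _)
        intro d d' hd hd' hlt
        have hdSm := List.mem_of_mem_filter hd
        have hdSm' := List.mem_of_mem_filter hd'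
        rw [pv_mem_Sm] at hdSm hdSm'
        obtain ⟨h1, h2, h3⟩ := hdSm
        obtain ⟨h1', h2', h3'⟩ := hdSm'
        rw [PySem.Int.floordiv_eq_ediv_of_pos (by omega),
          PySem.Int.floordiv_eq_ediv_of_pos (by omega)]
        have hmul : n / d * d = n := Int.ediv_mul_cancel h3
        have hmul' : n / d' * d' = n := Int.ediv_mul_cancel h3'
        have he' : 1 ≤ n / d' := by nlinarith
        nlinarith
      · intro x hx y hy
        rw [List.mem_reverse] at hy
        rw [pv_mem_Sm] at hx
        rw [pv_mem_Lg n (by omega) s hsdef] at hy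
        omega
    · intro a
      rw [hA, List.mem_append, List.mem_reverse, pv_mem_Sm, pv_mem_Lg n (by omega) s hsdef]
      constructor
      · rintro ⟨h1, h2, h3⟩
        rcases le_or_gt a (s : Int) with h | h
        · exact Or.inl ⟨h1, h, h3⟩
        · exact Or.inr ⟨h, h2, h3⟩
      · rintro (⟨h1, h2, h3⟩ | ⟨h1, h2, h3⟩)
        · exact ⟨h1, le_trans h2 hsn, h3⟩
        · exact ⟨by omega, h2, h3⟩

-- ===== VERDICT (by name: the statement is the Claim_ definition above) =====
theorem divizor_spec : Claim_equal_divizor := by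
  intro x y _
  unfold Spec_divizor divizor divizor_alt
  rw [pv_divs_eq x, pv_divs_eq y]
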